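-- pv_equiv track=rewrite | github.com/sunava/cognitive_robot_abstract_machine | pycram/scripts/analyze_ft_rosbag.py | topic_variant_key
-- ===== SOURCE A (Python) =====
-- def topic_variant_key(topic_name: str) -> str:
--     suffixes = sorted(
--         [
--             "_clean_derivative_avg",
--             "_clean_derivative",
--             "_clean_avg",
--             "_clean",
--             "_zeroed_derivative_avg",
--             "_zeroed_derivative",
--             "_zeroed_avg",
--             "_zeroed",
--             "_derivative_avg",
--             "_derivative",
--             "_avg",
--         ],
--         key=len,
--         reverse=True,
--     )
--     base = topic_name.split("/")[-1]
--     for suffix in suffixes: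
--         if base.endswith(suffix):
--             return base[: -len(suffix)]
--     return base
-- ===== SOURCE B (Python) =====
-- def topic_variant_key(topic_name: str) -> str:
--     base = topic_name.split("/")[-1]
--     if base.endswith("_avg"):
--         base = base[:-4]
--     if base.endswith("_derivative"):
--         base = base[:-11]
--     if base.endswith("_clean"):
--         base = base[:-6]
--     elif base.endswith("_zeroed"):
--         base = base[:-7]
--     return base
-- ===== Notes on version B (the rewrite author's own statement) =====
-- stated objective: simpler
-- what changed: B replaces A's sort-by-length of 11 composite suffixes and linear endswith scan by factoring the suffix family into its three independent components and stripping them stepwise: strip '_avg' if present, then '_derivative', then '_clean' or '_zeroed'; the stepwise strip provably equals A's longest-suffix match.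
import Mathlib
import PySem

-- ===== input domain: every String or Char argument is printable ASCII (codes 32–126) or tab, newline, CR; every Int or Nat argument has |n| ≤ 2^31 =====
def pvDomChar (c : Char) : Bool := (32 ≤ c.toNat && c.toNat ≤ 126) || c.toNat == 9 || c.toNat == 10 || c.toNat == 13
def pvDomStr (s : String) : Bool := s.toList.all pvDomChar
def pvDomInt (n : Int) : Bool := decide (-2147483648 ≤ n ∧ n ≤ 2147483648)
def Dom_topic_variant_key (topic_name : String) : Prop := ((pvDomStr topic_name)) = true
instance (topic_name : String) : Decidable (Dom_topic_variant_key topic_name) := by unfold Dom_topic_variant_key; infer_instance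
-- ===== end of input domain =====

-- B strips the three independent suffix components ('_avg', then '_derivative', then '_clean'/'_zeroed')
-- stepwise instead of sorting 11 composite suffixes by length and scanning for the first endswith match: simpler.

-- ===== PORT A =====
-- the for-loop over the sorted suffix list: first endswith match wins
def tvkGo (base : String) : List String → String
  | [] => base
  | suffix :: rest =>
    if PySem.Str.endswith base suffix then
      PySem.Str.slice base none (some (-(PySem.Str.len suffix : Int)))
    else tvkGo base rest

def topic_variant_key (topic_name : String) : String :=
  let suffixes := PySem.List.sorted
    ["_clean_derivative_avg", "_clean_derivative", "_clean_avg", "_clean",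
     "_zeroed_derivative_avg", "_zeroed_derivative", "_zeroed_avg", "_zeroed",
     "_derivative_avg", "_derivative", "_avg"]
    (fun s => PySem.Str.len s) true
  let base := (PySem.List.pyGet? ((PySem.Str.split? topic_name "/").getD []) (-1)).getD ""
  tvkGo base suffixes

-- ===== PORT B =====
def topic_variant_key_alt (topic_name : String) : String :=
  let base0 := (PySem.List.pyGet? ((PySem.Str.split? topic_name "/").getD []) (-1)).getD ""
  let base1 := if PySem.Str.endswith base0 "_avg" then PySem.Str.slice base0 none (some (-((4:Nat):Int))) else base0
  let base2 := if PySem.Str.endswith base1 "_derivative" then PySem.Str.slice base1 none (some (-((11:Nat):Int))) else base1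
  if PySem.Str.endswith base2 "_clean" then PySem.Str.slice base2 none (some (-((6:Nat):Int)))
  else if PySem.Str.endswith base2 "_zeroed" then PySem.Str.slice base2 none (some (-((7:Nat):Int)))
  else base2

-- ===== PRECONDITION & SPEC =====
def Spec_topic_variant_key (topic_name : String) (out : String) : Prop := out = topic_variant_key_alt topic_name
instance (topic_name : String) (out : String) : Decidable (Spec_topic_variant_key topic_name out) := by unfold Spec_topic_variant_key; infer_instance

-- ===== CLAIM (what is proved, stated in full; the proofs are below) =====
def Claim_equal_topic_variant_key : Prop := ∀ (topic_name : String), Dom_topic_variant_key topic_name → Spec_topic_variant_key topic_name (topic_variant_key topic_name)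

-- ===== LEMMAS AND PROOFS =====

theorem estr (s p : String) : (PySem.Str.endswith s p = true) ↔ p.toList <:+ s.toList := by
  simp [PySem.Chars.endswith_iff]

theorem sliceK (s : String) (k : Nat) (h : 0 < k) :
    (PySem.Str.slice s none (some (-(k:Int)))).toList = s.toList.take (s.toList.length - k) := by
  simp [PySem.Str.toList_slice, PySem.List.slice_to_neg_natCast _ _ h]

theorem suffix_short {a c m : List Char} (h1 : a <:+ m) (h2 : c <:+ m) (hl : a.length ≤ c.length) :
    a <:+ c := by
  rcases List.suffix_or_suffix_of_suffix h1 h2 with h | h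
  · exact h
  · have he : c = a := h.eq_of_length (le_antisymm h.length_le hl)
    rw [he]

theorem suffix_split (x y l : List Char) (hy : y <:+ l) :
    x ++ y <:+ l ↔ x <:+ l.take (l.length - y.length) := by
  obtain ⟨m, rfl⟩ := hy
  have h1 : (m ++ y).length - y.length = m.length := by simp
  rw [h1, List.take_left]
  constructor
  · rintro ⟨t, ht⟩
    refine ⟨t, ?_⟩
    have h2 : (t ++ x) ++ y = m ++ y := by rw [List.append_assoc]; exact ht
    exact List.append_cancel_right h2
  · rintro ⟨t, rfl⟩
    exact ⟨t, by rw [List.append_assoc]⟩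

theorem not_comp (x y : List Char) (l : List Char) (hy : ¬ y <:+ l) : ¬ (x ++ y <:+ l) :=
  fun h => hy ((List.suffix_append x y).trans h)



theorem suffix_split' (x y l : List Char) (k : Nat) (hy : y <:+ l) (hk : y.length = k) :
    x ++ y <:+ l ↔ x <:+ l.take (l.length - k) := hk ▸ suffix_split x y l hy

theorem sl4 (s : String) : (PySem.Str.slice s none (some (-((4:Nat):Int)))).toList = s.toList.take (s.toList.length - 4) := sliceK s 4 (by norm_num)
theorem sl6 (s : String) : (PySem.Str.slice s none (some (-((6:Nat):Int)))).toList = s.toList.take (s.toList.length - 6) := sliceK s 6 (by norm_num)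
theorem sl7 (s : String) : (PySem.Str.slice s none (some (-((7:Nat):Int)))).toList = s.toList.take (s.toList.length - 7) := sliceK s 7 (by norm_num)
theorem sl11 (s : String) : (PySem.Str.slice s none (some (-((11:Nat):Int)))).toList = s.toList.take (s.toList.length - 11) := sliceK s 11 (by norm_num)

-- generic refutation/construction helpers for the case analysis
theorem refShort (b p t : String) (hp : p.toList <:+ b.toList)
    (hne : ¬ p.toList <:+ t.toList) (hlen : p.toList.length ≤ t.toList.length) :
    ¬ (PySem.Str.endswith b t = true) :=
  fun h => hne (suffix_short hp ((estr b t).mp h) hlen)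

theorem refTail (b t y : String) (x : List Char) (hy : ¬ y.toList <:+ b.toList)
    (hdec : t.toList = x ++ y.toList) :
    ¬ (PySem.Str.endswith b t = true) :=
  fun h => not_comp x _ _ hy (hdec ▸ (estr b t).mp h)

theorem bcondPos (b p : String) (k : Nat) (h0 : 0 < k)
    (hx : p.toList <:+ b.toList.take (b.toList.length - k)) :
    PySem.Str.endswith (PySem.Str.slice b none (some (-(k:Int)))) p = true :=
  (estr _ _).mpr (by rw [sliceK b k h0]; exact hx)

theorem bcondNeg (b p : String) (k : Nat) (h0 : 0 < k)
    (hx : ¬ p.toList <:+ b.toList.take (b.toList.length - k)) :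
    ¬ (PySem.Str.endswith (PySem.Str.slice b none (some (-(k:Int)))) p = true) :=
  fun h => hx (by have h2 := (estr _ _).mp h; rwa [sliceK b k h0] at h2)

theorem refMidX (b t : String) (x : List Char) (hA : "_avg".toList <:+ b.toList)
    (hx : ¬ x <:+ b.toList.take (b.toList.length - 4))
    (hdec : t.toList = x ++ "_avg".toList) :
    ¬ (PySem.Str.endswith b t = true) :=
  fun h => hx ((suffix_split' _ _ _ 4 hA (by decide)).mp (hdec ▸ (estr b t).mp h))

theorem refMid (b t : String) (x : List Char) (hA : "_avg".toList <:+ b.toList)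
    (hD : ¬ "_derivative".toList <:+ b.toList.take (b.toList.length - 4))
    (hdec : t.toList = (x ++ "_derivative".toList) ++ "_avg".toList) :
    ¬ (PySem.Str.endswith b t = true) := by
  intro h
  have h1 := (suffix_split' _ _ _ 4 hA (by decide)).mp (hdec ▸ (estr b t).mp h)
  exact not_comp _ _ _ hD h1

theorem take15 (l : List Char) :
    (l.take (l.length - 4)).take ((l.take (l.length - 4)).length - 11) = l.take (l.length - 15) := by
  rw [List.length_take, List.take_take]; congr 1; omega

theorem refDeep (b t : String) (x : List Char) (hA : "_avg".toList <:+ b.toList)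
    (hD : "_derivative".toList <:+ b.toList.take (b.toList.length - 4))
    (hx : ¬ x <:+ b.toList.take (b.toList.length - 15))
    (hdec : t.toList = (x ++ "_derivative".toList) ++ "_avg".toList) :
    ¬ (PySem.Str.endswith b t = true) := by
  intro h
  have h1 := (suffix_split' _ _ _ 4 hA (by decide)).mp (hdec ▸ (estr b t).mp h)
  have h2 := (suffix_split' _ _ _ 11 hD (by decide)).mp h1
  rw [take15] at h2
  exact hx h2

theorem posDeep (b t : String) (x : List Char) (hA : "_avg".toList <:+ b.toList)
    (hD : "_derivative".toList <:+ b.toList.take (b.toList.length - 4))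
    (hx : x <:+ b.toList.take (b.toList.length - 15))
    (hdec : t.toList = (x ++ "_derivative".toList) ++ "_avg".toList) :
    PySem.Str.endswith b t = true := by
  apply (estr b t).mpr
  rw [hdec]
  exact (suffix_split' _ _ _ 4 hA (by decide)).mpr
    ((suffix_split' _ _ _ 11 hD (by decide)).mpr (by rw [take15]; exact hx))

theorem posMid (b t : String) (x : List Char) (hA : "_avg".toList <:+ b.toList)
    (hx : x <:+ b.toList.take (b.toList.length - 4))
    (hdec : t.toList = x ++ "_avg".toList) :
    PySem.Str.endswith b t = true := by
  apply (estr b t).mpr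
  rw [hdec]
  exact (suffix_split' _ _ _ 4 hA (by decide)).mpr hx

theorem posD11 (b t : String) (x : List Char) (hD : "_derivative".toList <:+ b.toList)
    (hx : x <:+ b.toList.take (b.toList.length - 11))
    (hdec : t.toList = x ++ "_derivative".toList) :
    PySem.Str.endswith b t = true := by
  apply (estr b t).mpr
  rw [hdec]
  exact (suffix_split' _ _ _ 11 hD (by decide)).mpr hx

theorem refD11 (b t : String) (x : List Char) (hD : "_derivative".toList <:+ b.toList)
    (hx : ¬ x <:+ b.toList.take (b.toList.length - 11))
    (hdec : t.toList = x ++ "_derivative".toList) :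
    ¬ (PySem.Str.endswith b t = true) := by
  intro h
  exact hx ((suffix_split' _ _ _ 11 hD (by decide)).mp (hdec ▸ (estr b t).mp h))


set_option maxHeartbeats 2000000 in
theorem chain_eq (b : String) :
    tvkGo b ["_zeroed_derivative_avg", "_clean_derivative_avg", "_zeroed_derivative",
             "_clean_derivative", "_derivative_avg", "_zeroed_avg", "_derivative",
             "_clean_avg", "_zeroed", "_clean", "_avg"] =
    (let base1 := if PySem.Str.endswith b "_avg" then PySem.Str.slice b none (some (-((4:Nat):Int))) else b
     let base2 := if PySem.Str.endswith base1 "_derivative" then PySem.Str.slice base1 none (some (-((11:Nat):Int))) else base1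
     if PySem.Str.endswith base2 "_clean" then PySem.Str.slice base2 none (some (-((6:Nat):Int)))
     else if PySem.Str.endswith base2 "_zeroed" then PySem.Str.slice base2 none (some (-((7:Nat):Int)))
     else base2) := by
  simp only [tvkGo]
  by_cases hA : "_avg".toList <:+ b.toList
  · by_cases hD : "_derivative".toList <:+ b.toList.take (b.toList.length - 4)
    · by_cases hC : "_clean".toList <:+ b.toList.take (b.toList.length - 15)
      · -- CASE 1: (_avg, _derivative, _clean) → "_clean_derivative_avg"
        rw [if_neg (refDeep b _ "_zeroed".toList hA hD
              (fun hz => absurd (suffix_short hC hz (by decide)) (by decide)) (by decide)),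
            if_pos (posDeep b _ "_clean".toList hA hD hC (by decide)),
            if_pos ((estr b "_avg").mpr hA), if_pos ((bcondPos b "_derivative" 4 (by norm_num) hD)),
            if_pos ((estr (PySem.Str.slice (PySem.Str.slice b none (some (-((4:Nat):Int)))) none (some (-((11:Nat):Int)))) "_clean").mpr (by rw [sliceK (PySem.Str.slice b none (some (-((4:Nat):Int)))) 11 (by norm_num), sliceK b 4 (by norm_num), take15]; exact hC))]
        all_goals
          apply String.toList_inj.mp
          simp only [show PySem.Str.len "_clean_derivative_avg" = ((21:Nat):Int) from by decide, sliceK b 21 (by norm_num), sl4, sl6, sl7, sl11, List.length_take, List.take_take]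
          try first
          | rfl
          | (congr 1; omega)
      · by_cases hZ : "_zeroed".toList <:+ b.toList.take (b.toList.length - 15)
        · -- CASE 2: (_avg, _derivative, _zeroed) → "_zeroed_derivative_avg"
          rw [if_pos (posDeep b _ "_zeroed".toList hA hD hZ (by decide)),
              if_pos ((estr b "_avg").mpr hA), if_pos ((bcondPos b "_derivative" 4 (by norm_num) hD)),
              if_neg ((fun h => hC (by have h2 := (estr (PySem.Str.slice (PySem.Str.slice b none (some (-((4:Nat):Int)))) none (some (-((11:Nat):Int)))) "_clean").mp h; rwa [sliceK (PySem.Str.slice b none (some (-((4:Nat):Int)))) 11 (by norm_num), sliceK b 4 (by norm_num), take15] at h2))),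
              if_pos ((estr (PySem.Str.slice (PySem.Str.slice b none (some (-((4:Nat):Int)))) none (some (-((11:Nat):Int)))) "_zeroed").mpr (by rw [sliceK (PySem.Str.slice b none (some (-((4:Nat):Int)))) 11 (by norm_num), sliceK b 4 (by norm_num), take15]; exact hZ))]
          all_goals
            apply String.toList_inj.mp
            simp only [show PySem.Str.len "_zeroed_derivative_avg" = ((22:Nat):Int) from by decide, sliceK b 22 (by norm_num), sl4, sl6, sl7, sl11, List.length_take, List.take_take]
            try first
            | rfl
            | (congr 1; omega)
        · -- CASE 3: (_avg, _derivative, -) → "_derivative_avg"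
          rw [if_neg (refDeep b _ "_zeroed".toList hA hD hZ (by decide)),
              if_neg (refDeep b _ "_clean".toList hA hD hC (by decide)),
              if_neg (refShort b "_avg" "_zeroed_derivative" hA (by decide) (by decide)),
              if_neg (refShort b "_avg" "_clean_derivative" hA (by decide) (by decide)),
              if_pos (posMid b _ "_derivative".toList hA hD (by decide)),
              if_pos ((estr b "_avg").mpr hA), if_pos ((bcondPos b "_derivative" 4 (by norm_num) hD)),
              if_neg ((fun h => hC (by have h2 := (estr (PySem.Str.slice (PySem.Str.slice b none (some (-((4:Nat):Int)))) none (some (-((11:Nat):Int)))) "_clean").mp h; rwa [sliceK (PySem.Str.slice b none (some (-((4:Nat):Int)))) 11 (by norm_num), sliceK b 4 (by norm_num), take15] at h2))),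
              if_neg ((fun h => hZ (by have h2 := (estr (PySem.Str.slice (PySem.Str.slice b none (some (-((4:Nat):Int)))) none (some (-((11:Nat):Int)))) "_zeroed").mp h; rwa [sliceK (PySem.Str.slice b none (some (-((4:Nat):Int)))) 11 (by norm_num), sliceK b 4 (by norm_num), take15] at h2)))]
          all_goals
            apply String.toList_inj.mp
            simp only [show PySem.Str.len "_derivative_avg" = ((15:Nat):Int) from by decide, sliceK b 15 (by norm_num), sl4, sl6, sl7, sl11, List.length_take, List.take_take]
            try first
            | rfl
            | (congr 1; omega)
    · by_cases hC : "_clean".toList <:+ b.toList.take (b.toList.length - 4)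
      · -- CASE 4: (_avg, -, _clean) → "_clean_avg"
        rw [if_neg (refMid b _ "_zeroed".toList hA hD (by decide)),
            if_neg (refMid b _ "_clean".toList hA hD (by decide)),
            if_neg (refShort b "_avg" "_zeroed_derivative" hA (by decide) (by decide)),
            if_neg (refShort b "_avg" "_clean_derivative" hA (by decide) (by decide)),
            if_neg (refMid b _ [] hA hD (by decide)),
            if_neg (refMidX b _ "_zeroed".toList hA (fun hz => absurd (suffix_short hC hz (by decide)) (by decide)) (by decide)),
            if_neg (refShort b "_avg" "_derivative" hA (by decide) (by decide)),
            if_pos (posMid b _ "_clean".toList hA hC (by decide)),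
            if_pos ((estr b "_avg").mpr hA), if_neg (bcondNeg b "_derivative" 4 (by norm_num) hD),
            if_pos ((bcondPos b "_clean" 4 (by norm_num) hC))]
        all_goals
          apply String.toList_inj.mp
          simp only [show PySem.Str.len "_clean_avg" = ((10:Nat):Int) from by decide, sliceK b 10 (by norm_num), sl4, sl6, sl7, sl11, List.length_take, List.take_take]
          try first
          | rfl
          | (congr 1; omega)
      · by_cases hZ : "_zeroed".toList <:+ b.toList.take (b.toList.length - 4)
        · -- CASE 5: (_avg, -, _zeroed) → "_zeroed_avg"
          rw [if_neg (refMid b _ "_zeroed".toList hA hD (by decide)),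
              if_neg (refMid b _ "_clean".toList hA hD (by decide)),
              if_neg (refShort b "_avg" "_zeroed_derivative" hA (by decide) (by decide)),
              if_neg (refShort b "_avg" "_clean_derivative" hA (by decide) (by decide)),
              if_neg (refMid b _ [] hA hD (by decide)),
              if_pos (posMid b _ "_zeroed".toList hA hZ (by decide)),
              if_pos ((estr b "_avg").mpr hA), if_neg (bcondNeg b "_derivative" 4 (by norm_num) hD),
              if_neg (bcondNeg b "_clean" 4 (by norm_num) hC),
              if_pos ((bcondPos b "_zeroed" 4 (by norm_num) hZ))]
          all_goals
            apply String.toList_inj.mp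
            simp only [show PySem.Str.len "_zeroed_avg" = ((11:Nat):Int) from by decide, sliceK b 11 (by norm_num), sl4, sl6, sl7, sl11, List.length_take, List.take_take]
            try first
            | rfl
            | (congr 1; omega)
        · -- CASE 6: (_avg, -, -) → "_avg"
          rw [if_neg (refMid b _ "_zeroed".toList hA hD (by decide)),
              if_neg (refMid b _ "_clean".toList hA hD (by decide)),
              if_neg (refShort b "_avg" "_zeroed_derivative" hA (by decide) (by decide)),
              if_neg (refShort b "_avg" "_clean_derivative" hA (by decide) (by decide)),
              if_neg (refMid b _ [] hA hD (by decide)),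
              if_neg (refMidX b _ "_zeroed".toList hA hZ (by decide)),
              if_neg (refShort b "_avg" "_derivative" hA (by decide) (by decide)),
              if_neg (refMidX b _ "_clean".toList hA hC (by decide)),
              if_neg (refShort b "_avg" "_zeroed" hA (by decide) (by decide)),
              if_neg (refShort b "_avg" "_clean" hA (by decide) (by decide)),
              if_pos ((estr b "_avg").mpr hA), if_pos ((estr b "_avg").mpr hA),
              if_neg (bcondNeg b "_derivative" 4 (by norm_num) hD),
              if_neg (bcondNeg b "_clean" 4 (by norm_num) hC),
              if_neg (bcondNeg b "_zeroed" 4 (by norm_num) hZ)]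
          all_goals
            apply String.toList_inj.mp
            simp only [show PySem.Str.len "_avg" = ((4:Nat):Int) from by decide, sliceK b 4 (by norm_num), sl4, sl6, sl7, sl11, List.length_take, List.take_take]
            try first
            | rfl
            | (congr 1; omega)
  · by_cases hD : "_derivative".toList <:+ b.toList
    · by_cases hC : "_clean".toList <:+ b.toList.take (b.toList.length - 11)
      · -- CASE 7: (-, _derivative, _clean) → "_clean_derivative"
        rw [if_neg (refTail b _ "_avg" ("_zeroed_derivative".toList) hA (by decide)),
            if_neg (refTail b _ "_avg" ("_clean_derivative".toList) hA (by decide)),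
            if_neg (refD11 b _ "_zeroed".toList hD
              (fun hz => absurd (suffix_short hC hz (by decide)) (by decide)) (by decide)),
            if_pos (posD11 b _ "_clean".toList hD hC (by decide)),
            if_neg ((fun h => hA ((estr b "_avg").mp h))), if_pos ((estr b "_derivative").mpr hD),
            if_pos ((bcondPos b "_clean" 11 (by norm_num) hC))]
        all_goals
          apply String.toList_inj.mp
          simp only [show PySem.Str.len "_clean_derivative" = ((17:Nat):Int) from by decide, sliceK b 17 (by norm_num), sl4, sl6, sl7, sl11, List.length_take, List.take_take]
          try first
          | rfl
          | (congr 1; omega)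
      · by_cases hZ : "_zeroed".toList <:+ b.toList.take (b.toList.length - 11)
        · -- CASE 8: (-, _derivative, _zeroed) → "_zeroed_derivative"
          rw [if_neg (refTail b _ "_avg" ("_zeroed_derivative".toList) hA (by decide)),
              if_neg (refTail b _ "_avg" ("_clean_derivative".toList) hA (by decide)),
              if_pos (posD11 b _ "_zeroed".toList hD hZ (by decide)),
              if_neg ((fun h => hA ((estr b "_avg").mp h))), if_pos ((estr b "_derivative").mpr hD),
              if_neg (bcondNeg b "_clean" 11 (by norm_num) hC),
              if_pos ((bcondPos b "_zeroed" 11 (by norm_num) hZ))]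
          all_goals
            apply String.toList_inj.mp
            simp only [show PySem.Str.len "_zeroed_derivative" = ((18:Nat):Int) from by decide, sliceK b 18 (by norm_num), sl4, sl6, sl7, sl11, List.length_take, List.take_take]
            try first
            | rfl
            | (congr 1; omega)
        · -- CASE 9: (-, _derivative, -) → "_derivative"
          rw [if_neg (refTail b _ "_avg" ("_zeroed_derivative".toList) hA (by decide)),
              if_neg (refTail b _ "_avg" ("_clean_derivative".toList) hA (by decide)),
              if_neg (refD11 b _ "_zeroed".toList hD hZ (by decide)),
              if_neg (refD11 b _ "_clean".toList hD hC (by decide)),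
              if_neg (refTail b _ "_avg" ("_derivative".toList) hA (by decide)),
              if_neg (refTail b _ "_avg" ("_zeroed".toList) hA (by decide)),
              if_pos ((estr b "_derivative").mpr hD),
              if_neg ((fun h => hA ((estr b "_avg").mp h))),
              if_pos ((estr b "_derivative").mpr hD),
              if_neg (bcondNeg b "_clean" 11 (by norm_num) hC),
              if_neg (bcondNeg b "_zeroed" 11 (by norm_num) hZ)]
          all_goals
            apply String.toList_inj.mp
            simp only [show PySem.Str.len "_derivative" = ((11:Nat):Int) from by decide, sliceK b 11 (by norm_num), sl4, sl6, sl7, sl11, List.length_take, List.take_take]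
            try first
            | rfl
            | (congr 1; omega)
    · by_cases hC : "_clean".toList <:+ b.toList
      · -- CASE 10: (-, -, _clean) → "_clean"
        rw [if_neg (refTail b _ "_avg" ("_zeroed_derivative".toList) hA (by decide)),
            if_neg (refTail b _ "_avg" ("_clean_derivative".toList) hA (by decide)),
            if_neg (refTail b _ "_derivative" ("_zeroed".toList) hD (by decide)),
            if_neg (refTail b _ "_derivative" ("_clean".toList) hD (by decide)),
            if_neg (refTail b _ "_avg" ("_derivative".toList) hA (by decide)),
            if_neg (refTail b _ "_avg" ("_zeroed".toList) hA (by decide)),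
            if_neg ((fun h => hD ((estr b "_derivative").mp h))),
            if_neg (refTail b _ "_avg" ("_clean".toList) hA (by decide)),
            if_neg (refShort b "_clean" "_zeroed" hC (by decide) (by decide)),
            if_pos ((estr b "_clean").mpr hC),
            if_neg ((fun h => hA ((estr b "_avg").mp h))),
            if_neg ((fun h => hD ((estr b "_derivative").mp h))),
            if_pos ((estr b "_clean").mpr hC)]
        all_goals
          apply String.toList_inj.mp
          simp only [show PySem.Str.len "_clean" = ((6:Nat):Int) from by decide, sliceK b 6 (by norm_num), sl4, sl6, sl7, sl11, List.length_take, List.take_take]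
          try first
          | rfl
          | (congr 1; omega)
      · by_cases hZ : "_zeroed".toList <:+ b.toList
        · -- CASE 11: (-, -, _zeroed) → "_zeroed"
          rw [if_neg (refTail b _ "_avg" ("_zeroed_derivative".toList) hA (by decide)),
              if_neg (refTail b _ "_avg" ("_clean_derivative".toList) hA (by decide)),
              if_neg (refTail b _ "_derivative" ("_zeroed".toList) hD (by decide)),
              if_neg (refTail b _ "_derivative" ("_clean".toList) hD (by decide)),
              if_neg (refTail b _ "_avg" ("_derivative".toList) hA (by decide)),
              if_neg (refTail b _ "_avg" ("_zeroed".toList) hA (by decide)),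
              if_neg ((fun h => hD ((estr b "_derivative").mp h))),
              if_neg (refTail b _ "_avg" ("_clean".toList) hA (by decide)),
              if_pos ((estr b "_zeroed").mpr hZ),
              if_neg ((fun h => hA ((estr b "_avg").mp h))),
              if_neg ((fun h => hD ((estr b "_derivative").mp h))),
              if_neg (fun h => hC ((estr b "_clean").mp h)),
              if_pos ((estr b "_zeroed").mpr hZ)]
          all_goals
            apply String.toList_inj.mp
            simp only [show PySem.Str.len "_zeroed" = ((7:Nat):Int) from by decide, sliceK b 7 (by norm_num), sl4, sl6, sl7, sl11, List.length_take, List.take_take]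
            try first
            | rfl
            | (congr 1; omega)
        · -- CASE 12: nothing matches → base unchanged
          rw [if_neg (refTail b _ "_avg" ("_zeroed_derivative".toList) hA (by decide)),
              if_neg (refTail b _ "_avg" ("_clean_derivative".toList) hA (by decide)),
              if_neg (refTail b _ "_derivative" ("_zeroed".toList) hD (by decide)),
              if_neg (refTail b _ "_derivative" ("_clean".toList) hD (by decide)),
              if_neg (refTail b _ "_avg" ("_derivative".toList) hA (by decide)),
              if_neg (refTail b _ "_avg" ("_zeroed".toList) hA (by decide)),
              if_neg ((fun h => hD ((estr b "_derivative").mp h))),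
              if_neg (refTail b _ "_avg" ("_clean".toList) hA (by decide)),
              if_neg (fun h => hZ ((estr b "_zeroed").mp h)),
              if_neg (fun h => hC ((estr b "_clean").mp h)),
              if_neg ((fun h => hA ((estr b "_avg").mp h))),
              if_neg ((fun h => hA ((estr b "_avg").mp h))),
              if_neg ((fun h => hD ((estr b "_derivative").mp h))),
              if_neg (fun h => hC ((estr b "_clean").mp h)),
              if_neg (fun h => hZ ((estr b "_zeroed").mp h))]

-- ===== VERDICT (by name: the statement is the Claim_ definition above) =====
theorem topic_variant_key_spec : Claim_equal_topic_variant_key := by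
  intro tn _
  unfold Spec_topic_variant_key
  show topic_variant_key tn = topic_variant_key_alt tn
  have hs : PySem.List.sorted
      ["_clean_derivative_avg", "_clean_derivative", "_clean_avg", "_clean",
       "_zeroed_derivative_avg", "_zeroed_derivative", "_zeroed_avg", "_zeroed",
       "_derivative_avg", "_derivative", "_avg"]
      (fun s => PySem.Str.len s) true
    = ["_zeroed_derivative_avg", "_clean_derivative_avg", "_zeroed_derivative",
       "_clean_derivative", "_derivative_avg", "_zeroed_avg", "_derivative",
       "_clean_avg", "_zeroed", "_clean", "_avg"] := by decide
  simp only [topic_variant_key, topic_variant_key_alt, hs]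
  exact chain_eq _
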